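-- pv_equiv track=rewrite | github.com/nate2211/ImageProject | content.py | _split_stage_extras
-- ===== SOURCE A (Python) =====
-- from typing import Any, Dict, List, Optional, Tuple
--
-- def _split_stage_extras(stages: List[str], raw_extras: Dict[str, Any]) -> List[Dict[str, Any]]:
--     stage_extras = [dict() for _ in stages]
--     global_extras: Dict[str, Any] = {}
--     name_targets: Dict[str, Dict[str, Any]] = {}
--     index_targets: Dict[int, Dict[str, Any]] = {}
--
--     for k, v in raw_extras.items():
--         if "." not in k:
--             global_extras[k] = v
--             continue
--         prefix, key = k.split(".", 1)
--         prefix = prefix.strip().lower(); key = key.strip()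
--         if prefix == "all":
--             global_extras[key] = v
--         elif prefix.isdigit():
--             idx = int(prefix)
--             if 0 <= idx < len(stages):
--                 index_targets.setdefault(idx, {})[key] = v
--         else:
--             name_targets.setdefault(prefix, {})[key] = v
--
--     for i, name in enumerate(stages):
--         merged: Dict[str, Any] = {}
--         merged.update(global_extras)
--         if name in name_targets:
--             merged.update(name_targets[name])
--         if i in index_targets:
--             merged.update(index_targets[i])
--         stage_extras[i] = merged
--     return stage_extras
-- ===== SOURCE B (Python) =====
-- def _split_stage_extras(stages, raw_extras):
--     # Parse every raw key once, then build each stage dict by three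
--     # precedence passes (global, by-name, by-index) over the parsed items.
--     parsed = []
--     for k, v in raw_extras.items():
--         if "." not in k:
--             parsed.append((None, k, v))
--         else:
--             p, key = k.split(".", 1)
--             parsed.append((p.strip().lower(), key.strip(), v))
--     result = []
--     for i, name in enumerate(stages):
--         merged = {}
--         for p, key, v in parsed:
--             if p is None or p == "all":
--                 merged[key] = v
--         for p, key, v in parsed:
--             if p is not None and p != "all" and not p.isdigit() and p == name:
--                 merged[key] = v
--         for p, key, v in parsed:
--             if p is not None and p.isdigit() and int(p) == i:
--                 merged[key] = v
--         result.append(merged)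
--     return result
-- ===== Notes on version B (the rewrite author's own statement) =====
-- stated objective: alternative
-- what changed: B drops A's precomputed global/name/index target tables and instead parses each raw key once and rebuilds every stage dict by three precedence passes (global, stage-name, stage-index) directly over the parsed items.
import Mathlib
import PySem

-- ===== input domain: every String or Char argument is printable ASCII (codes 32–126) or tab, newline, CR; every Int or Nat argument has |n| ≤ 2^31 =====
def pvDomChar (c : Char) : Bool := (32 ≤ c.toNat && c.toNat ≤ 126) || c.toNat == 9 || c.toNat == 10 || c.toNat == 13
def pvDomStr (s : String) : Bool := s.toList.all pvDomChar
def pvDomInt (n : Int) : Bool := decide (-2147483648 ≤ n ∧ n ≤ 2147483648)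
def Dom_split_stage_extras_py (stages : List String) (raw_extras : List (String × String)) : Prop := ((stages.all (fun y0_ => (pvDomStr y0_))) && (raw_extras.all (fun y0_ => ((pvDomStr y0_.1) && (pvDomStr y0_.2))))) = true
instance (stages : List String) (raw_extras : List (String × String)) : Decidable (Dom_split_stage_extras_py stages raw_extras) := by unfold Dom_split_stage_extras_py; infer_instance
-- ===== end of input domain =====

-- B rebuilds each stage dict by three precedence passes over the once-parsed raw items
-- instead of A's precomputed global/name/index tables; objective: alternative decomposition
-- (not claimed faster).

-- shared primitive: k.split(".", 1), exact whenever "." occurs in k (both Pythons call it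
-- only under that guard; the fallback arm is unreachable there)
def pvSplitDot1 (k : String) : String × String :=
  match PySem.Str.splitMax? k "." 1 with
  | some (p :: r :: _) => (p, r)
  | _ => (k, "")

-- ===== PORT A =====
-- merged.update(e) over a dict's item list
def pyUpdate (d : PySem.Dict String String) (l : List (String × String)) : PySem.Dict String String :=
  l.foldl (fun d kv => d.insert kv.1 kv.2) d

-- one iteration of A's first loop over (global_extras, name_targets, index_targets)
def splitA_step (nstages : Nat)
    (st : PySem.Dict String String × PySem.Dict String (PySem.Dict String String) × PySem.Dict Int (PySem.Dict String String))
    (kv : String × String) :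
    PySem.Dict String String × PySem.Dict String (PySem.Dict String String) × PySem.Dict Int (PySem.Dict String String) :=
  if PySem.Str.isIn "." kv.1 = false then (st.1.insert kv.1 kv.2, st.2.1, st.2.2)
  else
    let pr := pvSplitDot1 kv.1
    let p := PySem.Str.lower (PySem.Str.strip pr.1)
    let key := PySem.Str.strip pr.2
    if p = "all" then (st.1.insert key kv.2, st.2.1, st.2.2)
    else if PySem.Str.strIsdigit p = true then
      -- int(p): p.isdigit() guarantees int() succeeds; the .getD default is unreachable
      let idx := (PySem.Int.ofStr? p).getD 0
      if 0 ≤ idx ∧ idx < (nstages : Int) then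
        (st.1, st.2.1, st.2.2.insert idx ((st.2.2.getD idx PySem.Dict.empty).insert key kv.2))
      else st
    else (st.1, st.2.1.insert p ((st.2.1.getD p PySem.Dict.empty).insert key kv.2), st.2.2)

def split_stage_extras_py (stages : List String) (raw_extras : List (String × String)) : List (List (String × String)) :=
  let s := raw_extras.foldl (splitA_step stages.length) (PySem.Dict.empty, PySem.Dict.empty, PySem.Dict.empty)
  (PySem.List.enumerate stages).map (fun inm =>
    let merged := pyUpdate PySem.Dict.empty s.1.items
    let merged := match s.2.1.get? inm.2 with
      | some m => pyUpdate merged m.items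
      | none => merged
    let merged := match s.2.2.get? inm.1 with
      | some m => pyUpdate merged m.items
      | none => merged
    merged.items)

-- ===== PORT B =====
-- parse each raw key once: (None | stripped+lowered prefix, stripped key, value)
def splitB_parseOne (kv : String × String) : Option String × String × String :=
  if PySem.Str.isIn "." kv.1 = false then (none, kv.1, kv.2)
  else
    let pr := pvSplitDot1 kv.1
    (some (PySem.Str.lower (PySem.Str.strip pr.1)), PySem.Str.strip pr.2, kv.2)

def splitB_parse (raw_extras : List (String × String)) : List (Option String × String × String) :=
  raw_extras.map splitB_parseOne

-- pass 1: dotless or 'all.' keys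
def splitB_step1 (m : PySem.Dict String String) (e : Option String × String × String) : PySem.Dict String String :=
  match e.1 with
  | none => m.insert e.2.1 e.2.2
  | some p => if p = "all" then m.insert e.2.1 e.2.2 else m

-- pass 2: keys whose prefix names this stage
def splitB_step2 (name : String) (m : PySem.Dict String String) (e : Option String × String × String) : PySem.Dict String String :=
  match e.1 with
  | none => m
  | some p => if p ≠ "all" ∧ PySem.Str.strIsdigit p = false ∧ p = name then m.insert e.2.1 e.2.2 else m

-- pass 3: keys whose prefix is this stage's index
def splitB_step3 (i : Int) (m : PySem.Dict String String) (e : Option String × String × String) : PySem.Dict String String :=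
  match e.1 with
  | some p => if PySem.Str.strIsdigit p = true ∧ (PySem.Int.ofStr? p).getD 0 = i then m.insert e.2.1 e.2.2 else m
  | none => m

def split_stage_extras_py_alt (stages : List String) (raw_extras : List (String × String)) : List (List (String × String)) :=
  let parsed := splitB_parse raw_extras
  (PySem.List.enumerate stages).map (fun inm =>
    let m1 := parsed.foldl splitB_step1 PySem.Dict.empty
    let m2 := parsed.foldl (splitB_step2 inm.2) m1
    let m3 := parsed.foldl (splitB_step3 inm.1) m2
    m3.items)

-- ===== PRECONDITION & SPEC =====
def Spec_split_stage_extras_py (stages : List String) (raw_extras : List (String × String)) (out : List (List (String × String))) : Prop := out = split_stage_extras_py_alt stages raw_extras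
instance (stages : List String) (raw_extras : List (String × String)) (out : List (List (String × String))) : Decidable (Spec_split_stage_extras_py stages raw_extras out) := by unfold Spec_split_stage_extras_py; infer_instance

-- ===== CLAIM (what is proved, stated in full; the proofs are below) =====
def Claim_equal_split_stage_extras_py : Prop := ∀ (stages : List String) (raw_extras : List (String × String)), Dom_split_stage_extras_py stages raw_extras → Spec_split_stage_extras_py stages raw_extras (split_stage_extras_py stages raw_extras)

-- ===== LEMMAS AND PROOFS =====

-- classification of one raw item, mirroring the shared branch structure
inductive PvCls where
  | glob (key : String)
  | nm (p key : String)
  | ix (idx : Int) (key : String)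
  | drop
deriving DecidableEq, Repr

def pvCls (n : Nat) (kv : String × String) : PvCls :=
  if PySem.Str.isIn "." kv.1 = false then .glob kv.1
  else
    let pr := pvSplitDot1 kv.1
    let p := PySem.Str.lower (PySem.Str.strip pr.1)
    let key := PySem.Str.strip pr.2
    if p = "all" then .glob key
    else if PySem.Str.strIsdigit p = true then
      let idx := (PySem.Int.ofStr? p).getD 0
      if 0 ≤ idx ∧ idx < (n : Int) then .ix idx key else .drop
    else .nm p key

def pvGl (n : Nat) (l : List (String × String)) : List (String × String) :=
  l.filterMap (fun kv => match pvCls n kv with | .glob key => some (key, kv.2) | _ => none)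

def pvNl (n : Nat) (name : String) (l : List (String × String)) : List (String × String) :=
  l.filterMap (fun kv => match pvCls n kv with
    | .nm p key => if p = name then some (key, kv.2) else none
    | _ => none)

def pvIl (n : Nat) (i : Int) (l : List (String × String)) : List (String × String) :=
  l.filterMap (fun kv => match pvCls n kv with
    | .ix idx key => if idx = i then some (key, kv.2) else none
    | _ => none)

-- generic fold-of-inserts
def pvU {κ ν : Type} [BEq κ] (d : PySem.Dict κ ν) (l : List (κ × ν)) : PySem.Dict κ ν :=
  l.foldl (fun d kv => d.insert kv.1 kv.2) d

theorem pvU_nil {κ ν : Type} [BEq κ] (d : PySem.Dict κ ν) : pvU d [] = d := rfl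

theorem pvU_cons {κ ν : Type} [BEq κ] (d : PySem.Dict κ ν) (kv : κ × ν) (l : List (κ × ν)) :
    pvU d (kv :: l) = pvU (d.insert kv.1 kv.2) l := rfl

theorem pyUpdate_eq_pvU (d : PySem.Dict String String) (l : List (String × String)) :
    pyUpdate d l = pvU d l := rfl

theorem pv_items_empty {κ ν : Type} : (PySem.Dict.empty : PySem.Dict κ ν).items = [] := rfl

theorem pv_not_mem_items_of_not_contains {κ ν : Type} [BEq κ] [LawfulBEq κ]
    (d : PySem.Dict κ ν) (k : κ) (h : d.contains k = false) :
    ∀ p ∈ d.items, (p.1 == k) = false := by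
  intro p hp
  cases hb : (p.1 == k) with
  | false => rfl
  | true =>
    exfalso
    have hpk : p.1 = k := eq_of_beq hb
    have hc : d.contains k = true := by
      rw [PySem.Dict.contains_iff_mem_keys]
      exact hpk ▸ PySem.Dict.mem_keys_of_mem_items (d := d) (p := p) hp
    simp [hc] at h

theorem pv_map_subst_id {κ ν : Type} [BEq κ] (k : κ) (v : ν) :
    ∀ (l : List (κ × ν)), (∀ p ∈ l, (p.1 == k) = false) →
      l.map (fun p => if (p.1 == k) = true then (k, v) else p) = l := by
  intro l
  induction l with
  | nil => intro _; rfl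
  | cons a l ih =>
    intro h
    rw [List.map_cons, if_neg (by rw [h a (by simp)]; exact Bool.false_ne_true),
        ih (fun p hp => h p (List.mem_cons_of_mem a hp))]

-- L1: inserting the same key twice keeps only the last value
theorem pv_insert_insert_self {κ ν : Type} [BEq κ] [LawfulBEq κ]
    (d : PySem.Dict κ ν) (k : κ) (v' v : ν) :
    (d.insert k v').insert k v = d.insert k v := by
  apply PySem.Dict.ext
  have hc : (d.insert k v').contains k = true := by simp [PySem.Dict.contains_insert]
  rw [PySem.Dict.items_insert, if_pos hc, PySem.Dict.items_insert, PySem.Dict.items_insert]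
  by_cases hdk : d.contains k = true
  · rw [if_pos hdk, if_pos hdk, List.map_map]
    apply List.map_congr_left
    intro p _
    by_cases hp : (p.1 == k) = true <;> simp [hp]
  · rw [if_neg hdk, if_neg hdk, List.map_append,
        pv_map_subst_id k v d.items (pv_not_mem_items_of_not_contains d k (by simpa using hdk))]
    simp

-- L2: inserts of distinct keys commute when the second key is already present
theorem pv_insert_comm {κ ν : Type} [BEq κ] [LawfulBEq κ]
    (d : PySem.Dict κ ν) (j k : κ) (w v : ν) (hjk : (j == k) = false) (hk : d.contains k = true) :
    (d.insert j w).insert k v = (d.insert k v).insert j w := by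
  apply PySem.Dict.ext
  have hjk' : j ≠ k := by simpa using hjk
  have hkj : (k == j) = false := by simp [Ne.symm hjk']
  have hc1 : (d.insert j w).contains k = true := by simp [PySem.Dict.contains_insert, hk]
  have hc2 : (d.insert k v).contains j = d.contains j := by
    simp [PySem.Dict.contains_insert, hjk]
  rw [PySem.Dict.items_insert (d.insert j w), if_pos hc1,
      PySem.Dict.items_insert (d.insert k v), hc2,
      PySem.Dict.items_insert, PySem.Dict.items_insert, if_pos hk]
  by_cases hdj : d.contains j = true
  · rw [if_pos hdj, if_pos hdj, List.map_map, List.map_map]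
    apply List.map_congr_left
    intro p _
    by_cases hpj : (p.1 == j) = true
    · have hpk : (p.1 == k) = false := by
        cases hb : (p.1 == k)
        · rfl
        · exact absurd ((eq_of_beq hpj).symm.trans (eq_of_beq hb)) hjk'
      simp [hpj, hpk, hjk]
    · by_cases hpk : (p.1 == k) = true <;> simp [hpj, hpk, hkj]
  · rw [if_neg hdj, if_neg hdj, List.map_append]
    simp [hjk]

-- L3: an insert of a key already present commutes past a fold over items avoiding that key
theorem pv_insert_pvU {κ ν : Type} [BEq κ] [LawfulBEq κ] (k : κ) (v : ν) :
    ∀ (l : List (κ × ν)) (d : PySem.Dict κ ν), d.contains k = true → k ∉ l.map Prod.fst →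
      (pvU d l).insert k v = pvU (d.insert k v) l := by
  intro l
  induction l with
  | nil => intro d _ _; rfl
  | cons jw l ih =>
    intro d hk hnm
    have hj : jw.1 ≠ k := by
      intro h; exact hnm (by simp [h, List.map_cons])
    have hjb : (jw.1 == k) = false := by simp [hj]
    rw [pvU_cons, pvU_cons,
        ih (d.insert jw.1 jw.2) (by simp [PySem.Dict.contains_insert, hk]) (by
          intro hmem; exact hnm (by simp [List.map_cons, hmem])),
        pv_insert_comm d jw.1 k jw.2 v hjb hk]

-- L4: folding an item list with one key's value substituted = fold then insert
theorem pv_pvU_subst {κ ν : Type} [BEq κ] [LawfulBEq κ] (k : κ) (v : ν) :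
    ∀ (l : List (κ × ν)) (d : PySem.Dict κ ν), (l.map Prod.fst).Nodup → k ∈ l.map Prod.fst →
      pvU d (l.map (fun p => if (p.1 == k) = true then (k, v) else p)) = (pvU d l).insert k v := by
  intro l
  induction l with
  | nil => intro d _ h; simp at h
  | cons kw l ih =>
    intro d hnd hmem
    rw [List.map_cons] at hnd
    rw [List.nodup_cons] at hnd
    by_cases hk : kw.1 = k
    · have hnl : k ∉ l.map Prod.fst := hk ▸ hnd.1
      have hid : l.map (fun p => if (p.1 == k) = true then (k, v) else p) = l := by
        apply pv_map_subst_id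
        intro p hp
        cases hb : (p.1 == k)
        · rfl
        · exact absurd (eq_of_beq hb ▸ List.mem_map_of_mem hp : (k : κ) ∈ l.map Prod.fst) hnl
      rw [List.map_cons]
      rw [if_pos (show (kw.1 == k) = true by simp [hk])]
      rw [pvU_cons, pvU_cons, hid]
      rw [pv_insert_pvU k v l (d.insert kw.1 kw.2) (by simp [PySem.Dict.contains_insert, hk]) hnl]
      rw [show (d.insert kw.1 kw.2).insert k v = d.insert k v from by
        rw [hk, pv_insert_insert_self]]
    · have hkb : (kw.1 == k) = false := by simp [hk]
      have hmem' : k ∈ l.map Prod.fst := by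
        rcases (by simpa [List.map_cons] using hmem : k = kw.1 ∨ k ∈ l.map Prod.fst) with h | h
        · exact absurd h.symm hk
        · exact h
      rw [List.map_cons, pvU_cons]
      simp only [hkb]
      rw [if_neg (by simp), pvU_cons]
      exact ih (d.insert kw.1 kw.2) hnd.2 hmem'

-- L5: folding the items of e.insert k v = folding e.items then inserting
theorem pv_pvU_items_insert {κ ν : Type} [BEq κ] [LawfulBEq κ]
    (e : PySem.Dict κ ν) (k : κ) (v : ν) (d : PySem.Dict κ ν) (hnd : e.keys.Nodup) :
    pvU d (e.insert k v).items = (pvU d e.items).insert k v := by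
  rw [PySem.Dict.items_insert]
  by_cases hc : e.contains k = true
  · rw [if_pos hc]
    have hk : k ∈ e.items.map Prod.fst := by
      have := (PySem.Dict.contains_iff_mem_keys e k).mp hc
      simpa [PySem.Dict.keys] using this
    have hnd' : (e.items.map Prod.fst).Nodup := by simpa [PySem.Dict.keys] using hnd
    exact pv_pvU_subst k v e.items d hnd' hk
  · rw [if_neg hc]
    unfold pvU
    rw [List.foldl_append]
    rfl

-- L6/L7: re-folding a dict built by a fold of inserts = folding the original list
theorem pv_pvU_pvU {κ ν : Type} [BEq κ] [LawfulBEq κ] :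
    ∀ (l : List (κ × ν)) (e d : PySem.Dict κ ν), e.keys.Nodup →
      pvU d (pvU e l).items = pvU (pvU d e.items) l := by
  intro l
  induction l with
  | nil => intro e d _; rfl
  | cons kv l ih =>
    intro e d hnd
    rw [pvU_cons, pvU_cons,
        ih (e.insert kv.1 kv.2) d (PySem.Dict.nodup_keys_insert e kv.1 kv.2 hnd),
        pv_pvU_items_insert e kv.1 kv.2 d hnd]

theorem pv_pvU_collapse {κ ν : Type} [BEq κ] [LawfulBEq κ]
    (d : PySem.Dict κ ν) (l : List (κ × ν)) :
    pvU d (pvU PySem.Dict.empty l).items = pvU d l := by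
  rw [pv_pvU_pvU l PySem.Dict.empty d (by simpa using PySem.Dict.nodup_keys_empty (κ := κ) (ν := ν))]
  rw [pv_items_empty, pvU_nil]

-- A's step expressed through the classifier
set_option maxHeartbeats 1000000 in
theorem splitA_step_eq (n : Nat) (st : PySem.Dict String String × PySem.Dict String (PySem.Dict String String) × PySem.Dict Int (PySem.Dict String String)) (kv : String × String) :
    splitA_step n st kv =
      match pvCls n kv with
      | .glob key => (st.1.insert key kv.2, st.2.1, st.2.2)
      | .nm p key => (st.1, st.2.1.insert p ((st.2.1.getD p PySem.Dict.empty).insert key kv.2), st.2.2)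
      | .ix idx key => (st.1, st.2.1, st.2.2.insert idx ((st.2.2.getD idx PySem.Dict.empty).insert key kv.2))
      | .drop => st := by
  unfold splitA_step pvCls
  by_cases h1 : PySem.Str.isIn "." kv.1 = false
  · simp only [if_pos h1]
  · simp only [if_neg h1]
    by_cases h2 : PySem.Str.lower (PySem.Str.strip (pvSplitDot1 kv.1).1) = "all"
    · simp only [if_pos h2]
    · simp only [if_neg h2]
      by_cases h3 : PySem.Str.strIsdigit (PySem.Str.lower (PySem.Str.strip (pvSplitDot1 kv.1).1)) = true
      · simp only [if_pos h3]
        by_cases h4 : 0 ≤ (PySem.Int.ofStr? (PySem.Str.lower (PySem.Str.strip (pvSplitDot1 kv.1).1))).getD 0 ∧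
            (PySem.Int.ofStr? (PySem.Str.lower (PySem.Str.strip (pvSplitDot1 kv.1).1))).getD 0 < (n : Int)
        · simp only [if_pos h4]
        · simp only [if_neg h4]
      · simp only [if_neg h3]

-- B's three steps expressed through the classifier
set_option maxHeartbeats 1000000 in
theorem splitB_step1_eq (n : Nat) (kv : String × String) (m : PySem.Dict String String) :
    splitB_step1 m (splitB_parseOne kv) =
      match pvCls n kv with
      | .glob key => m.insert key kv.2
      | _ => m := by
  unfold splitB_step1 splitB_parseOne pvCls
  by_cases h1 : PySem.Str.isIn "." kv.1 = false
  · simp only [if_pos h1]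
  · simp only [if_neg h1]
    by_cases h2 : PySem.Str.lower (PySem.Str.strip (pvSplitDot1 kv.1).1) = "all"
    · simp only [if_pos h2]
    · simp only [if_neg h2]
      by_cases h3 : PySem.Str.strIsdigit (PySem.Str.lower (PySem.Str.strip (pvSplitDot1 kv.1).1)) = true
      · simp only [if_pos h3]
        by_cases h4 : 0 ≤ (PySem.Int.ofStr? (PySem.Str.lower (PySem.Str.strip (pvSplitDot1 kv.1).1))).getD 0 ∧
            (PySem.Int.ofStr? (PySem.Str.lower (PySem.Str.strip (pvSplitDot1 kv.1).1))).getD 0 < (n : Int)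
        · simp only [if_pos h4]
        · simp only [if_neg h4]
      · simp only [if_neg h3]

set_option maxHeartbeats 1000000 in
theorem splitB_step2_eq (n : Nat) (name : String) (kv : String × String) (m : PySem.Dict String String) :
    splitB_step2 name m (splitB_parseOne kv) =
      match pvCls n kv with
      | .nm p key => if p = name then m.insert key kv.2 else m
      | _ => m := by
  unfold splitB_step2 splitB_parseOne pvCls
  by_cases h1 : PySem.Str.isIn "." kv.1 = false
  · simp only [if_pos h1]
  · simp only [if_neg h1]
    by_cases h2 : PySem.Str.lower (PySem.Str.strip (pvSplitDot1 kv.1).1) = "all"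
    · simp only [if_pos h2]
      rw [if_neg (by intro hc; exact hc.1 h2)]
    · simp only [if_neg h2]
      by_cases h3 : PySem.Str.strIsdigit (PySem.Str.lower (PySem.Str.strip (pvSplitDot1 kv.1).1)) = true
      · simp only [if_pos h3]
        rw [if_neg (by intro hc; rw [hc.2.1] at h3; exact Bool.false_ne_true h3)]
        by_cases h4 : 0 ≤ (PySem.Int.ofStr? (PySem.Str.lower (PySem.Str.strip (pvSplitDot1 kv.1).1))).getD 0 ∧
            (PySem.Int.ofStr? (PySem.Str.lower (PySem.Str.strip (pvSplitDot1 kv.1).1))).getD 0 < (n : Int)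
        · simp only [if_pos h4]
        · simp only [if_neg h4]
      · simp only [if_neg h3]
        have h3' : PySem.Str.strIsdigit (PySem.Str.lower (PySem.Str.strip (pvSplitDot1 kv.1).1)) = false := by
          simpa using h3
        by_cases h4 : PySem.Str.lower (PySem.Str.strip (pvSplitDot1 kv.1).1) = name
        · rw [if_pos ⟨h2, h3', h4⟩, if_pos h4]
        · rw [if_neg (by intro hc; exact h4 hc.2.2), if_neg h4]

set_option maxHeartbeats 1000000 in
theorem splitB_step3_eq (n : Nat) (i : Int) (h0 : 0 ≤ i) (hn : i < (n : Int)) (kv : String × String) (m : PySem.Dict String String) :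
    splitB_step3 i m (splitB_parseOne kv) =
      match pvCls n kv with
      | .ix idx key => if idx = i then m.insert key kv.2 else m
      | _ => m := by
  unfold splitB_step3 splitB_parseOne pvCls
  by_cases h1 : PySem.Str.isIn "." kv.1 = false
  · simp only [if_pos h1]
  · simp only [if_neg h1]
    by_cases h2 : PySem.Str.lower (PySem.Str.strip (pvSplitDot1 kv.1).1) = "all"
    · simp only [if_pos h2]
      rw [if_neg (by
        intro hc
        rw [h2] at hc
        have : PySem.Str.strIsdigit "all" = false := by decide
        rw [this] at hc
        exact Bool.false_ne_true hc.1)]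
    · simp only [if_neg h2]
      by_cases h3 : PySem.Str.strIsdigit (PySem.Str.lower (PySem.Str.strip (pvSplitDot1 kv.1).1)) = true
      · simp only [if_pos h3]
        by_cases h4 : (PySem.Int.ofStr? (PySem.Str.lower (PySem.Str.strip (pvSplitDot1 kv.1).1))).getD 0 = i
        · rw [if_pos ⟨h3, h4⟩, h4, if_pos ⟨h0, hn⟩]
          simp
        · rw [if_neg (by intro hc; exact h4 hc.2)]
          by_cases h5 : 0 ≤ (PySem.Int.ofStr? (PySem.Str.lower (PySem.Str.strip (pvSplitDot1 kv.1).1))).getD 0 ∧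
              (PySem.Int.ofStr? (PySem.Str.lower (PySem.Str.strip (pvSplitDot1 kv.1).1))).getD 0 < (n : Int)
          · rw [if_pos h5]
            simp only [if_neg h4]
          · rw [if_neg h5]
      · simp only [if_neg h3]
        rw [if_neg (by intro hc; exact h3 hc.1)]

-- invariants of A's first loop
theorem loopA_g (n : Nat) :
    ∀ (l : List (String × String)) g nt it,
      (l.foldl (splitA_step n) (g, nt, it)).1 = pvU g (pvGl n l) := by
  intro l
  induction l with
  | nil => intro g nt it; rfl
  | cons kv l ih =>
    intro g nt it
    rw [List.foldl_cons, splitA_step_eq]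
    cases h : pvCls n kv <;>
      simp only [h] <;>
      rw [ih] <;>
      simp [pvGl, List.filterMap_cons, h, pvU_cons]

theorem loopA_nt (n : Nat) (name : String) :
    ∀ (l : List (String × String)) g nt it,
      ((l.foldl (splitA_step n) (g, nt, it)).2.1).getD name PySem.Dict.empty
        = pvU (nt.getD name PySem.Dict.empty) (pvNl n name l) := by
  intro l
  induction l with
  | nil => intro g nt it; rfl
  | cons kv l ih =>
    intro g nt it
    rw [List.foldl_cons, splitA_step_eq]
    cases h : pvCls n kv with
    | glob key => simp only [h]; rw [ih]; simp [pvNl, List.filterMap_cons, h]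
    | nm p key =>
      simp only [h]
      rw [ih]
      by_cases hp : p = name
      · subst hp
        simp [pvNl, List.filterMap_cons, h, PySem.Dict.getD_insert, pvU_cons]
      · simp [pvNl, List.filterMap_cons, h, PySem.Dict.getD_insert, hp, Ne.symm hp]
    | ix idx key => simp only [h]; rw [ih]; simp [pvNl, List.filterMap_cons, h]
    | drop => simp only [h]; rw [ih]; simp [pvNl, List.filterMap_cons, h]

theorem loopA_it (n : Nat) (i : Int) :
    ∀ (l : List (String × String)) g nt it,
      ((l.foldl (splitA_step n) (g, nt, it)).2.2).getD i PySem.Dict.empty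
        = pvU (it.getD i PySem.Dict.empty) (pvIl n i l) := by
  intro l
  induction l with
  | nil => intro g nt it; rfl
  | cons kv l ih =>
    intro g nt it
    rw [List.foldl_cons, splitA_step_eq]
    cases h : pvCls n kv with
    | glob key => simp only [h]; rw [ih]; simp [pvIl, List.filterMap_cons, h]
    | nm p key => simp only [h]; rw [ih]; simp [pvIl, List.filterMap_cons, h]
    | ix idx key =>
      simp only [h]
      rw [ih]
      by_cases hp : idx = i
      · subst hp
        simp [pvIl, List.filterMap_cons, h, PySem.Dict.getD_insert, pvU_cons]
      · simp [pvIl, List.filterMap_cons, h, PySem.Dict.getD_insert, hp, Ne.symm hp]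
    | drop => simp only [h]; rw [ih]; simp [pvIl, List.filterMap_cons, h]

-- 'if name in targets: merged.update(targets[name])' = update with getD
theorem pv_match_getD {κ : Type} [BEq κ] [LawfulBEq κ]
    (d : PySem.Dict κ (PySem.Dict String String)) (k : κ) (acc : PySem.Dict String String) :
    (match d.get? k with
      | some m => pyUpdate acc m.items
      | none => acc) = pyUpdate acc ((d.getD k PySem.Dict.empty).items) := by
  rw [PySem.Dict.getD_eq_get?_getD]
  cases h : d.get? k
  · simp [h, pyUpdate, pv_items_empty]
  · simp [h]

-- B's per-stage passes reach the same category lists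
theorem loopB1 (n : Nat) :
    ∀ (l : List (String × String)) (m : PySem.Dict String String),
      (l.map splitB_parseOne).foldl splitB_step1 m = pvU m (pvGl n l) := by
  intro l
  induction l with
  | nil => intro m; rfl
  | cons kv l ih =>
    intro m
    rw [List.map_cons, List.foldl_cons, splitB_step1_eq n]
    cases h : pvCls n kv <;>
      simp only [h] <;>
      rw [ih] <;>
      simp [pvGl, List.filterMap_cons, h, pvU_cons]

theorem loopB2 (n : Nat) (name : String) :
    ∀ (l : List (String × String)) (m : PySem.Dict String String),
      (l.map splitB_parseOne).foldl (splitB_step2 name) m = pvU m (pvNl n name l) := by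
  intro l
  induction l with
  | nil => intro m; rfl
  | cons kv l ih =>
    intro m
    rw [List.map_cons, List.foldl_cons, splitB_step2_eq n name]
    cases h : pvCls n kv with
    | glob key => simp only [h]; rw [ih]; simp [pvNl, List.filterMap_cons, h]
    | nm p key =>
      simp only [h]
      by_cases hp : p = name
      · rw [if_pos hp, ih]
        simp [pvNl, List.filterMap_cons, h, hp, pvU_cons]
      · rw [if_neg hp, ih]
        simp [pvNl, List.filterMap_cons, h, hp]
    | ix idx key => simp only [h]; rw [ih]; simp [pvNl, List.filterMap_cons, h]
    | drop => simp only [h]; rw [ih]; simp [pvNl, List.filterMap_cons, h]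

theorem loopB3 (n : Nat) (i : Int) (h0 : 0 ≤ i) (hn : i < (n : Int)) :
    ∀ (l : List (String × String)) (m : PySem.Dict String String),
      (l.map splitB_parseOne).foldl (splitB_step3 i) m = pvU m (pvIl n i l) := by
  intro l
  induction l with
  | nil => intro m; rfl
  | cons kv l ih =>
    intro m
    rw [List.map_cons, List.foldl_cons, splitB_step3_eq n i h0 hn]
    cases h : pvCls n kv with
    | glob key => simp only [h]; rw [ih]; simp [pvIl, List.filterMap_cons, h]
    | nm p key => simp only [h]; rw [ih]; simp [pvIl, List.filterMap_cons, h]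
    | ix idx key =>
      simp only [h]
      by_cases hp : idx = i
      · rw [if_pos hp, ih]
        simp [pvIl, List.filterMap_cons, h, hp, pvU_cons]
      · rw [if_neg hp, ih]
        simp [pvIl, List.filterMap_cons, h, hp]
    | drop => simp only [h]; rw [ih]; simp [pvIl, List.filterMap_cons, h]

-- ===== VERDICT (by name: the statement is the Claim_ definition above) =====
theorem split_stage_extras_py_spec : Claim_equal_split_stage_extras_py := by
  intro stages raw_extras _
  show split_stage_extras_py stages raw_extras = split_stage_extras_py_alt stages raw_extras
  unfold split_stage_extras_py split_stage_extras_py_alt splitB_parse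
  dsimp only
  apply List.map_congr_left
  intro inm hmem
  rcases (PySem.List.mem_enumerate_iff stages 0 inm).mp hmem with ⟨k, hk, hkv⟩
  have hi1 : inm.1 = (k : Int) := by rw [hkv]; simp
  have h0 : 0 ≤ inm.1 := by rw [hi1]; exact Int.natCast_nonneg k
  have hn : inm.1 < (stages.length : Int) := by rw [hi1]; exact_mod_cast hk
  rw [pv_match_getD, pv_match_getD,
      loopA_g stages.length raw_extras PySem.Dict.empty PySem.Dict.empty PySem.Dict.empty,
      loopA_nt stages.length inm.2 raw_extras PySem.Dict.empty PySem.Dict.empty PySem.Dict.empty,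
      loopA_it stages.length inm.1 raw_extras PySem.Dict.empty PySem.Dict.empty PySem.Dict.empty,
      PySem.Dict.getD_empty, PySem.Dict.getD_empty]
  rw [loopB1 stages.length raw_extras, loopB2 stages.length inm.2 raw_extras,
      loopB3 stages.length inm.1 h0 hn raw_extras]
  rw [pyUpdate_eq_pvU, pyUpdate_eq_pvU, pyUpdate_eq_pvU]
  rw [pv_pvU_collapse, pv_pvU_collapse, pv_pvU_collapse]
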